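-- pv_equiv track=rewrite | github.com/JaronX/SoftUni | PythonFundamentals/Functions/01_Multiply_Evens_by_Odds.py | multiply_evens_by_odds
-- ===== SOURCE A (Python) =====
-- def multiply_evens_by_odds(number):
--     even_sum = 0
--     odd_sum = 0
--
--     for digit in str(number):
--         last_number = abs(number) % 10
--
--         if last_number % 2 == 0:
--             even_sum += last_number
--         else:
--             odd_sum += last_number
--
--         number = abs(number) // 10
--
--     return even_sum * odd_sum
-- ===== SOURCE B (Python) =====
-- def multiply_evens_by_odds(number):
--     even_sum = 0
--     odd_sum = 0
--     for ch in str(abs(number)):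
--         d = int(ch)
--         if d % 2 == 0:
--             even_sum += d
--         else:
--             odd_sum += d
--     return even_sum * odd_sum
-- ===== Notes on version B (the rewrite author's own statement) =====
-- stated objective: idiomatic
-- what changed: B reads the digits directly as characters of str(abs(number)) with int(ch), keeping only the two sum accumulators, instead of A's parallel arithmetic state (abs/%10//10 re-division of number each iteration, plus a wasted extra '-' iteration for negatives).
import Mathlib
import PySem

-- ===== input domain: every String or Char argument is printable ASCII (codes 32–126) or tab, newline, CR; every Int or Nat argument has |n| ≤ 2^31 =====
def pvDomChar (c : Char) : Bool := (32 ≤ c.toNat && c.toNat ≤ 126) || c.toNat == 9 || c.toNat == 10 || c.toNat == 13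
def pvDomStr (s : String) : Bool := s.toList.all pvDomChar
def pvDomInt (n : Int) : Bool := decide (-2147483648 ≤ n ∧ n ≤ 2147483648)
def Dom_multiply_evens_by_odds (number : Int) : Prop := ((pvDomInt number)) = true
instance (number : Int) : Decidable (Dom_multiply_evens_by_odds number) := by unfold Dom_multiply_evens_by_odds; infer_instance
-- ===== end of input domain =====

-- B reads digits as characters of str(abs(number)) with int(ch), keeping only the two sums,
-- instead of A's parallel arithmetic re-division of number; same cost, more idiomatic.


-- ===== PORT A =====
-- A's loop body on state (even_sum, odd_sum, number); one iteration per character of str(number)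
def pvStepA (st : Int × Int × Int) (_ : Char) : Int × Int × Int :=
  let last_number := PySem.Int.mod |st.2.2| 10
  if PySem.Int.mod last_number 2 = 0 then
    (st.1 + last_number, st.2.1, PySem.Int.floordiv |st.2.2| 10)
  else
    (st.1, st.2.1 + last_number, PySem.Int.floordiv |st.2.2| 10)

def multiply_evens_by_odds (number : Int) : Int :=
  let r := (PySem.Int.toChars number).foldl pvStepA (0, 0, number)
  r.1 * r.2.1

-- ===== PORT B =====
-- B's loop body on state (even_sum, odd_sum); d = int(ch), exact for the decimal
-- digit characters str(abs(number)) produces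
def pvStepB (st : Int × Int) (ch : Char) : Int × Int :=
  let d : Int := (ch.toNat : Int) - 48
  if PySem.Int.mod d 2 = 0 then (st.1 + d, st.2) else (st.1, st.2 + d)

def multiply_evens_by_odds_alt (number : Int) : Int :=
  let r := (PySem.Int.toChars |number|).foldl pvStepB (0, 0)
  r.1 * r.2

-- ===== PRECONDITION & SPEC =====
def Spec_multiply_evens_by_odds (number : Int) (out : Int) : Prop := out = multiply_evens_by_odds_alt number
instance (number : Int) (out : Int) : Decidable (Spec_multiply_evens_by_odds number out) := by unfold Spec_multiply_evens_by_odds; infer_instance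

-- ===== CLAIM (what is proved, stated in full; the proofs are below) =====
def Claim_equal_multiply_evens_by_odds : Prop := ∀ (number : Int), Dom_multiply_evens_by_odds number → Spec_multiply_evens_by_odds number (multiply_evens_by_odds number)

-- ===== LEMMAS AND PROOFS =====

-- (even digit sum, odd digit sum) of a natural number
def pvSums (m : Nat) : Int × Int :=
  if m = 0 then (0, 0)
  else
    let d : Int := (m % 10 : Nat)
    let r := pvSums (m / 10)
    if d % 2 = 0 then (r.1 + d, r.2) else (r.1, r.2 + d)
decreasing_by exact Nat.div_lt_self (Nat.pos_of_ne_zero (by assumption)) (by norm_num)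

lemma pvSums_zero : pvSums 0 = (0, 0) := by rw [pvSums]; simp

lemma pvSums_step (m : Nat) :
    pvSums m = (if ((m % 10 : Nat) : Int) % 2 = 0
      then ((pvSums (m / 10)).1 + ((m % 10 : Nat) : Int), (pvSums (m / 10)).2)
      else ((pvSums (m / 10)).1, (pvSums (m / 10)).2 + ((m % 10 : Nat) : Int))) := by
  by_cases h : m = 0
  · subst h; simp [pvSums]
  · rw [pvSums]; simp [h]

-- big-endian decimal digit characters of m, as Nat.toDigits produces them
def pvChars (m : Nat) : List Char :=
  let d := Nat.digitChar (m % 10)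
  if _h : m / 10 = 0 then [d] else pvChars (m / 10) ++ [d]
decreasing_by exact Nat.div_lt_self (by omega) (by norm_num)

lemma toDigitsCore_eq_pvChars (f : Nat) : ∀ (n : Nat) (acc : List Char),
    0 < f → n < 10 ^ f → Nat.toDigitsCore 10 f n acc = pvChars n ++ acc := by
  induction f with
  | zero => intro n acc h; omega
  | succ f ih =>
    intro n acc _ hn
    rw [Nat.toDigitsCore]
    by_cases h10 : n / 10 = 0
    · simp only [h10, if_true]
      rw [pvChars, dif_pos h10]
      rfl
    · simp only [h10, if_false]
      have hlt : n / 10 < 10 ^ f := by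
        rw [pow_succ] at hn
        exact Nat.div_lt_of_lt_mul (by omega)
      have hf : 0 < f := by
        rcases Nat.eq_zero_or_pos f with h | h
        · subst h; simp at hlt; omega
        · exact h
      have hrec : pvChars n = pvChars (n / 10) ++ [Nat.digitChar (n % 10)] := by
        rw [pvChars, dif_neg h10]
      rw [ih (n / 10) _ hf hlt, hrec, List.append_assoc]
      rfl

lemma toDigits_eq_pvChars (n : Nat) : Nat.toDigits 10 n = pvChars n := by
  have hlt : n < 10 ^ (n + 1) := by
    calc n < 10 ^ n := Nat.lt_pow_self (by norm_num)
      _ ≤ 10 ^ (n + 1) := Nat.pow_le_pow_right (by norm_num) (by omega)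
  have h := toDigitsCore_eq_pvChars (n + 1) n [] (by omega) hlt
  simpa using h

lemma lt_pow_length_pvChars (m : Nat) : m < 10 ^ (pvChars m).length := by
  rw [pvChars]
  by_cases h : m / 10 = 0
  · simp [h]; omega
  · simp only [h, dif_neg, not_false_iff, List.length_append, List.length_singleton]
    have ih := lt_pow_length_pvChars (m / 10)
    have : m < 10 * 10 ^ (pvChars (m / 10)).length := by omega
    calc m < 10 * 10 ^ (pvChars (m / 10)).length := this
      _ = 10 ^ ((pvChars (m / 10)).length + 1) := by ring
decreasing_by exact Nat.div_lt_self (by omega) (by norm_num)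

lemma digitChar_toNat (d : Nat) (h : d < 10) : ((Nat.digitChar d).toNat : Int) - 48 = (d : Int) := by
  interval_cases d <;> decide

-- A's loop: the accumulated sums depend only on the list's length; any list long enough
-- to exhaust the digits of |n| accumulates exactly the even/odd digit sums (extra steps add 0).
lemma foldA_spec (L : List Char) : ∀ (e o : Int) (n : Int), n.natAbs < 10 ^ L.length →
    (L.foldl pvStepA (e, o, n)).1 = e + (pvSums n.natAbs).1 ∧
    (L.foldl pvStepA (e, o, n)).2.1 = o + (pvSums n.natAbs).2 := by
  induction L with
  | nil =>
    intro e o n hn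
    have h0 : n.natAbs = 0 := by simpa using hn
    simp [h0, pvSums_zero]
  | cons c L ih =>
    intro e o n hn
    have habs : |n| = ((n.natAbs : Nat) : Int) := by
      rw [Int.abs_eq_natAbs]
    have hmod : PySem.Int.mod |n| 10 = ((n.natAbs % 10 : Nat) : Int) := by
      rw [habs]; exact PySem.Int.mod_natCast n.natAbs 10
    have hdiv : PySem.Int.floordiv |n| 10 = ((n.natAbs / 10 : Nat) : Int) := by
      rw [habs]; exact PySem.Int.floordiv_natCast n.natAbs 10
    have hmod2 : PySem.Int.mod ((n.natAbs % 10 : Nat) : Int) 2 = ((n.natAbs % 10 : Nat) : Int) % 2 :=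
      PySem.Int.mod_eq_emod_of_pos (by norm_num)
    have hdivlt : ((n.natAbs / 10 : Nat) : Int).natAbs < 10 ^ L.length := by
      simp only [Int.natAbs_natCast]
      rw [List.length_cons, pow_succ] at hn
      exact Nat.div_lt_of_lt_mul (by omega)
    simp only [List.foldl_cons, pvStepA, hmod, hdiv, hmod2]
    by_cases hpar : ((n.natAbs % 10 : Nat) : Int) % 2 = 0
    · rw [if_pos hpar]
      obtain ⟨h1, h2⟩ := ih (e + ((n.natAbs % 10 : Nat) : Int)) o _ hdivlt
      rw [h1, h2, pvSums_step n.natAbs, if_pos hpar]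
      simp only [Int.natAbs_natCast]
      constructor <;> first | trivial | ring
    · rw [if_neg hpar]
      obtain ⟨h1, h2⟩ := ih e (o + ((n.natAbs % 10 : Nat) : Int)) _ hdivlt
      rw [h1, h2, pvSums_step n.natAbs, if_neg hpar]
      simp only [Int.natAbs_natCast]
      constructor <;> first | trivial | ring

-- B's loop over the big-endian digit characters accumulates the same sums.
lemma foldB_spec (m : Nat) : ∀ (e o : Int),
    (pvChars m).foldl pvStepB (e, o) = (e + (pvSums m).1, o + (pvSums m).2) := by
  intro e o
  rw [pvChars]
  have hd10 : m % 10 < 10 := Nat.mod_lt _ (by norm_num)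
  have hdval := digitChar_toNat (m % 10) hd10
  have hmod2 : PySem.Int.mod ((m % 10 : Nat) : Int) 2 = ((m % 10 : Nat) : Int) % 2 :=
    PySem.Int.mod_eq_emod_of_pos (by norm_num)
  by_cases h : m / 10 = 0
  · simp only [h, dif_pos, List.foldl_cons, List.foldl_nil, pvStepB, hdval, hmod2]
    rw [pvSums_step m, h, pvSums_zero]
    by_cases hpar : ((m % 10 : Nat) : Int) % 2 = 0
    · rw [if_pos hpar, if_pos hpar]; simp
    · rw [if_neg hpar, if_neg hpar]; simp
  · simp only [h, dif_neg, not_false_iff, List.foldl_append, List.foldl_cons, List.foldl_nil]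
    rw [foldB_spec (m / 10) e o]
    simp only [pvStepB, hdval, hmod2]
    rw [pvSums_step m]
    by_cases hpar : ((m % 10 : Nat) : Int) % 2 = 0
    · rw [if_pos hpar, if_pos hpar]
      simp only [Prod.mk.injEq]
      constructor <;> first | trivial | ring
    · rw [if_neg hpar, if_neg hpar]
      simp only [Prod.mk.injEq]
      constructor <;> first | trivial | ring
decreasing_by exact Nat.div_lt_self (by omega) (by norm_num)

-- ===== VERDICT (by name: the statement is the Claim_ definition above) =====
theorem multiply_evens_by_odds_spec : Claim_equal_multiply_evens_by_odds := by
  intro number _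
  unfold Spec_multiply_evens_by_odds
  simp only [multiply_evens_by_odds, multiply_evens_by_odds_alt]
  have hB : PySem.Int.toChars |number| = pvChars number.natAbs := by
    rw [PySem.Int.toChars, if_neg (not_lt.mpr (abs_nonneg number)), toDigits_eq_pvChars]
    congr 1
    rw [Int.abs_eq_natAbs, Int.toNat_natCast]
  rw [hB, foldB_spec number.natAbs 0 0]
  by_cases hneg : number < 0
  · have hA : PySem.Int.toChars number = '-' :: pvChars number.natAbs := by
      rw [PySem.Int.toChars, if_pos hneg, toDigits_eq_pvChars]
    rw [hA]
    have hlen : number.natAbs < 10 ^ ('-' :: pvChars number.natAbs).length := by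
      have := lt_pow_length_pvChars number.natAbs
      rw [List.length_cons, pow_succ]
      omega
    obtain ⟨h1, h2⟩ := foldA_spec ('-' :: pvChars number.natAbs) 0 0 number hlen
    rw [h1, h2]
  · have hA : PySem.Int.toChars number = pvChars number.natAbs := by
      rw [PySem.Int.toChars, if_neg hneg, toDigits_eq_pvChars]
      congr 1
      omega
    rw [hA]
    obtain ⟨h1, h2⟩ := foldA_spec (pvChars number.natAbs) 0 0 number (lt_pow_length_pvChars number.natAbs)
    rw [h1, h2]
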